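-- pv_equiv track=rewrite | github.com/zoelgriffiths/Darts | darts_v3.py | find_sector_from_angle
-- ===== SOURCE A (Python) =====
-- def find_sector_from_angle(angle):
--     angles = [18*i-9 for i in range(1,21)]
--     sector_scores = [6,13,4,18,1,20,5,12,9,14,11,8,16,7,19,3,17,2,15,10]
--     sector_look_up = dict(zip(angles,sector_scores))
--     if angle > 351:
--         sector = 6
--     else:
--         for key in sector_look_up.keys():
--             if angle <= key:
--                 sector_angle = key
--                 break
--         sector = sector_look_up[sector_angle]
--     return sector
-- ===== SOURCE B (Python) =====
-- def find_sector_from_angle(angle):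
--     sector_scores = [6,13,4,18,1,20,5,12,9,14,11,8,16,7,19,3,17,2,15,10]
--     if angle > 351:
--         return 6
--     idx = max(1, -(-(angle + 9) // 18))  # ceil((angle+9)/18), clamped up to 1
--     return sector_scores[idx - 1]
-- ===== Notes on version B (the rewrite author's own statement) =====
-- stated objective: simpler
-- what changed: Replaces the dict built from zip plus a linear scan over its keys with a direct closed-form bucket index (ceiling division by 18, clamped to 1) into the fixed score list.
import Mathlib
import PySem

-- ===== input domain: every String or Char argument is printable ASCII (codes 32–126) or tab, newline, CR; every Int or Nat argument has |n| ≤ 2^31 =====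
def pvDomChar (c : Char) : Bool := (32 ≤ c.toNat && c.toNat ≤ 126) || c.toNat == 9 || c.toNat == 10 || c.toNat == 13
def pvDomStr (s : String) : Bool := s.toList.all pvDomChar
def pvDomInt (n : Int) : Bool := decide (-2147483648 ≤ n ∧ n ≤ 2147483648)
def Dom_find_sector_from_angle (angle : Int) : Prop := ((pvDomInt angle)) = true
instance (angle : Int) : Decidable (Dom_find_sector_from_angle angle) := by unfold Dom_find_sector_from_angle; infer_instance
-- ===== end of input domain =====

-- B computes the sector by a closed-form clamped ceiling-division bucket index instead of A's zip-dict and linear key scan (objective: simpler).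

-- ===== PORT A =====
def find_sector_from_angle (angle : Int) : Int :=
  let angles : List Int := (PySem.List.pyRange 1 21 1).map (fun i => 18 * i - 9)
  let sector_scores : List Int := [6,13,4,18,1,20,5,12,9,14,11,8,16,7,19,3,17,2,15,10]
  let sector_look_up : PySem.Dict Int Int := PySem.Dict.ofList (angles.zip sector_scores)
  if angle > 351 then 6
  else
    -- the for/break loop over the dict's keys: first key with angle ≤ key
    match sector_look_up.keys.find? (fun key => angle ≤ key) with
    | some sector_angle => sector_look_up.getD sector_angle 0  -- KeyError impossible: the key comes from the dict
    | none => 0  -- unreachable: angle ≤ 351, the last key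

-- ===== PORT B =====
def find_sector_from_angle_alt (angle : Int) : Int :=
  let sector_scores : List Int := [6,13,4,18,1,20,5,12,9,14,11,8,16,7,19,3,17,2,15,10]
  if angle > 351 then 6
  else
    let idx := max 1 (-(PySem.Int.floordiv (-(angle + 9)) 18))
    (PySem.List.pyGet? sector_scores (idx - 1)).getD 0  -- index always in [0,19]: IndexError impossible

-- ===== PRECONDITION & SPEC =====
def Spec_find_sector_from_angle (angle : Int) (out : Int) : Prop := out = find_sector_from_angle_alt angle
instance (angle : Int) (out : Int) : Decidable (Spec_find_sector_from_angle angle out) := by unfold Spec_find_sector_from_angle; infer_instance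

-- ===== CLAIM (what is proved, stated in full; the proofs are below) =====
def Claim_equal_find_sector_from_angle : Prop := ∀ (angle : Int), Dom_find_sector_from_angle angle → Spec_find_sector_from_angle angle (find_sector_from_angle angle)

-- ===== LEMMAS AND PROOFS =====

set_option maxRecDepth 4000 in
-- the finite middle range 10..351, checked by evaluation
lemma fsa_finite_check :
    ((List.range 342).all (fun n => find_sector_from_angle (10 + (n : Int)) == find_sector_from_angle_alt (10 + (n : Int)))) = true := by
  decide

lemma fsa_mid (angle : Int) (h1 : 9 < angle) (h2 : angle ≤ 351) :
    find_sector_from_angle angle = find_sector_from_angle_alt angle := by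
  have hn : angle = 10 + ((angle - 10).toNat : Int) := by omega
  have hmem : (angle - 10).toNat ∈ List.range 342 := by
    rw [List.mem_range]; omega
  have := List.all_eq_true.mp fsa_finite_check _ hmem
  rw [hn]
  exact eq_of_beq this

lemma fsa_low (angle : Int) (h : angle ≤ 9) :
    find_sector_from_angle angle = find_sector_from_angle_alt angle := by
  have hA : find_sector_from_angle angle = 6 := by
    simp only [find_sector_from_angle]
    rw [if_neg (by omega)]
    rw [show (PySem.Dict.ofList ((((PySem.List.pyRange 1 21 1).map (fun i => 18 * i - 9))).zip
        ([6,13,4,18,1,20,5,12,9,14,11,8,16,7,19,3,17,2,15,10] : List Int))).keys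
      = (9 : Int) :: [27, 45, 63, 81, 99, 117, 135, 153, 171, 189, 207, 225, 243, 261, 279, 297, 315, 333, 351] from by decide]
    rw [List.find?_cons_of_pos (by simpa using h)]
    decide
  have hidx : max 1 (-(PySem.Int.floordiv (-(angle + 9)) 18)) = 1 := by
    have h18 : (0:Int) < 18 := by omega
    -- bound the ceiling: angle ≤ 9 gives ceil((angle+9)/18) ≤ 1
    have hceil : -(PySem.Int.floordiv (-(angle + 9)) 18) ≤ 1 := by
      by_contra hc
      rw [not_le] at hc
      rcases (PySem.Int.neg_floordiv_neg_eq_iff_of_pos (a := angle + 9) (b := 18)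
        (q := -(PySem.Int.floordiv (-(angle + 9)) 18)) h18).mp rfl with ⟨hlo, _⟩
      nlinarith
    omega
  have hB : find_sector_from_angle_alt angle = 6 := by
    simp only [find_sector_from_angle_alt]
    rw [if_neg (by omega)]
    rw [hidx]
    decide
  rw [hA, hB]

lemma fsa_high (angle : Int) (h : 351 < angle) :
    find_sector_from_angle angle = find_sector_from_angle_alt angle := by
  simp [find_sector_from_angle, find_sector_from_angle_alt, h]

-- ===== VERDICT (by name: the statement is the Claim_ definition above) =====
theorem find_sector_from_angle_spec : Claim_equal_find_sector_from_angle := by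
  intro angle _
  unfold Spec_find_sector_from_angle
  by_cases h : angle ≤ 9
  · exact fsa_low angle h
  · by_cases h2 : angle ≤ 351
    · exact fsa_mid angle (by omega) h2
    · exact fsa_high angle (by omega)
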